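-- pv_equiv track=rewrite | github.com/Hasraj3344/Resume_Builder | src/parsers/resume_parser.py | _split_skills_preserve_groups
-- ===== SOURCE A (Python) =====
-- from typing import List, Optional, Dict, Tuple
--
-- def _split_skills_preserve_groups(text: str, delimiter: str) -> List[str]:
--     """Split skills by delimiter but preserve content within parentheses as single units."""
--     skills = []
--     current = ""
--     paren_depth = 0
--
--     for char in text:
--         if char == '(':
--             paren_depth += 1
--             current += char
--         elif char == ')':
--             paren_depth -= 1
--             current += char
--         elif char == delimiter and paren_depth == 0:
--             # Split here
--             skill = current.strip()
--             if skill: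
--                 skills.append(skill)
--             current = ""
--         else:
--             current += char
--
--     # Add the last skill
--     skill = current.strip()
--     if skill:
--         skills.append(skill)
--
--     return skills
-- ===== SOURCE B (Python) =====
-- from typing import List
--
-- def _split_skills_preserve_groups(text: str, delimiter: str) -> List[str]:
--     """Split skills by delimiter but preserve content within parentheses as single units."""
--     # Pass 1: record the indices where a split happens (delimiter char at paren balance 0).
--     cuts = []
--     bal = 0
--     for i, c in enumerate(text):
--         if c == '(':
--             bal += 1
--         elif c == ')':
--             bal -= 1
--         elif bal == 0 and c == delimiter:
--             cuts.append(i)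
--     # Pass 2: slice the text between consecutive cut points, strip, drop empties.
--     out = []
--     start = 0
--     for end in cuts + [len(text)]:
--         seg = text[start:end].strip()
--         if seg:
--             out.append(seg)
--         start = end + 1
--     return out
-- ===== Notes on version B (the rewrite author's own statement) =====
-- stated objective: alternative
-- what changed: B replaces A's single scan that grows a string buffer and emits along the way with a two-pass plan: first collect the cut indices (delimiter character at paren balance 0), then slice the text between consecutive cut points, stripping each slice and dropping empties.
import Mathlib
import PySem

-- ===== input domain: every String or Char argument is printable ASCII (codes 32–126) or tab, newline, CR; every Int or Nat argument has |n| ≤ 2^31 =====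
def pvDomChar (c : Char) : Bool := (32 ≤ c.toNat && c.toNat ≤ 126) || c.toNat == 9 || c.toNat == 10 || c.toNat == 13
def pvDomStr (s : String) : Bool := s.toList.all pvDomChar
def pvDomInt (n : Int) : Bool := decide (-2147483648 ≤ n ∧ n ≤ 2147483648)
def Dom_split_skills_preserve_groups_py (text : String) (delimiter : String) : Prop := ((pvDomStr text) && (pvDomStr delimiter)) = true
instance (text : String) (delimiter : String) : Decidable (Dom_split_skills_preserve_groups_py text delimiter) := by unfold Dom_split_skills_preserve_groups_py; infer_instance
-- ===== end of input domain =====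

-- B replaces A's single scan with a growing string buffer by a two-pass plan —
-- first collect the cut indices (delimiter char at paren balance 0), then slice
-- the text between consecutive cuts — same return value on every input (alternative decomposition).


-- ===== PORT A =====
-- state: (skills, current, paren_depth); `char == delimiter` on a 1-char string char
-- is `delimiter.toList = [c]`
def pvAStep (d : List Char) (st : List (List Char) × List Char × Int) (c : Char) :
    List (List Char) × List Char × Int :=
  if c = '(' then (st.1, st.2.1 ++ [c], st.2.2 + 1)
  else if c = ')' then (st.1, st.2.1 ++ [c], st.2.2 - 1)
  else if d = [c] ∧ st.2.2 = 0 then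
    (if PySem.Chars.strip st.2.1 ≠ [] then st.1 ++ [PySem.Chars.strip st.2.1] else st.1,
     [], st.2.2)
  else (st.1, st.2.1 ++ [c], st.2.2)

def split_skills_preserve_groups_py (text : String) (delimiter : String) : List String :=
  let st := text.toList.foldl (pvAStep delimiter.toList) ([], [], 0)
  let skill := PySem.Chars.strip st.2.1
  (if skill ≠ [] then st.1 ++ [skill] else st.1).map (fun cs => String.ofList cs)

-- ===== PORT B =====
-- pass 1: fold over enumerate(text) collecting cut indices, state (cuts, bal)
def pvBCutStep (d : List Char) (st : List Int × Int) (ic : Int × Char) : List Int × Int :=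
  if ic.2 = '(' then (st.1, st.2 + 1)
  else if ic.2 = ')' then (st.1, st.2 - 1)
  else if st.2 = 0 ∧ d = [ic.2] then (st.1 ++ [ic.1], st.2)
  else st

-- pass 2: state (out, start); for each end point, strip text[start:end], keep if non-empty
def pvBEmitStep (s : List Char) (st : List (List Char) × Int) (e : Int) :
    List (List Char) × Int :=
  let seg := PySem.Chars.strip (PySem.List.slice s (some st.2) (some e))
  (if seg ≠ [] then st.1 ++ [seg] else st.1, e + 1)

def split_skills_preserve_groups_py_alt (text : String) (delimiter : String) : List String :=
  let s := text.toList
  let cuts := ((PySem.List.enumerate s 0).foldl (pvBCutStep delimiter.toList) ([], 0)).1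
  let out := ((cuts ++ [(s.length : Int)]).foldl (pvBEmitStep s) ([], 0)).1
  out.map (fun cs => String.ofList cs)

-- ===== PRECONDITION & SPEC =====
def Spec_split_skills_preserve_groups_py (text : String) (delimiter : String) (out : List String) : Prop := out = split_skills_preserve_groups_py_alt text delimiter
instance (text : String) (delimiter : String) (out : List String) : Decidable (Spec_split_skills_preserve_groups_py text delimiter out) := by unfold Spec_split_skills_preserve_groups_py; infer_instance

-- ===== CLAIM (what is proved, stated in full; the proofs are below) =====
def Claim_equal_split_skills_preserve_groups_py : Prop := ∀ (text : String) (delimiter : String), Dom_split_skills_preserve_groups_py text delimiter → Spec_split_skills_preserve_groups_py text delimiter (split_skills_preserve_groups_py text delimiter)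

-- ===== LEMMAS AND PROOFS =====

lemma pv_take_drop₁ (done r : List Char) (start : Nat) (h : start ≤ done.length) :
    ((done ++ r).drop start).take (done.length - start) = done.drop start := by
  rw [List.drop_append_of_le_length h]
  rw [show done.length - start = (done.drop start).length by simp]
  exact List.take_left

lemma pv_take_drop₂ (done : List Char) (c : Char) (r : List Char) (start : Nat)
    (h : start ≤ done.length) :
    ((done ++ c :: r).drop start).take (done.length + 1 - start) = done.drop start ++ [c] := by
  rw [List.drop_append_of_le_length h]
  rw [show done.length + 1 - start = (done.drop start).length + 1 by simp; omega]
  rw [List.take_append]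
  simp

-- the loop invariant: after processing `done`, A's state is (skills, text[start:|done|], depth);
-- B's pass-1 state is (cuts, depth) and replaying pass 2 on cuts yields exactly (skills, start).
lemma pv_inv (d s : List Char) (rest : List Char) :
    ∀ (done : List Char) (skills : List (List Char)) (depth : Int) (cuts : List Int)
      (start : Nat),
      s = done ++ rest → start ≤ done.length →
      cuts.foldl (pvBEmitStep s) ([], 0) = (skills, (start : Int)) →
      ((((PySem.List.enumerate rest (done.length : Int)).foldl (pvBCutStep d) (cuts, depth)).1
          ++ [(s.length : Int)]).foldl (pvBEmitStep s) ([], 0)).1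
        = (let stA := rest.foldl (pvAStep d)
              (skills, (s.drop start).take (done.length - start), depth)
           if PySem.Chars.strip stA.2.1 ≠ [] then stA.1 ++ [PySem.Chars.strip stA.2.1]
           else stA.1) := by
  induction rest with
  | nil =>
    intro done skills depth cuts start hs hle hfold
    subst hs
    simp only [PySem.List.enumerate_nil, List.foldl_nil, List.foldl_append, hfold,
      List.foldl_cons, pvBEmitStep]
    simp [PySem.List.slice_natCast]
  | cons c rest ih =>
    intro done skills depth cuts start hs hle hfold
    rw [PySem.List.enumerate_cons, List.foldl_cons, List.foldl_cons]
    by_cases h₁ : c = '('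
    · rw [show pvBCutStep d (cuts, depth) ((done.length : Int), c) = (cuts, depth + 1) by
        simp [pvBCutStep, h₁]]
      rw [show pvAStep d (skills, (s.drop start).take (done.length - start), depth) c
            = (skills, (s.drop start).take (done.length - start) ++ [c], depth + 1) by
        simp [pvAStep, h₁]]
      have hc2 : ((s.drop start).take (done.length + 1 - start))
          = (s.drop start).take (done.length - start) ++ [c] := by
        rw [hs, pv_take_drop₂ _ _ _ _ hle, pv_take_drop₁ _ _ _ hle]
      have := ih (done ++ [c]) skills (depth + 1) cuts start
        (by simpa using hs) (by simpa using Nat.le_succ_of_le hle) hfold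
      simp only [List.length_append, List.length_cons, List.length_nil, Nat.zero_add,
        Nat.cast_add, Nat.cast_one, hc2] at this
      exact this
    · by_cases h₂ : c = ')'
      · rw [show pvBCutStep d (cuts, depth) ((done.length : Int), c) = (cuts, depth - 1) by
          simp [pvBCutStep, h₂]]
        rw [show pvAStep d (skills, (s.drop start).take (done.length - start), depth) c
              = (skills, (s.drop start).take (done.length - start) ++ [c], depth - 1) by
          simp [pvAStep, h₂]]
        have hc2 : ((s.drop start).take (done.length + 1 - start))
            = (s.drop start).take (done.length - start) ++ [c] := by
          rw [hs, pv_take_drop₂ _ _ _ _ hle, pv_take_drop₁ _ _ _ hle]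
        have := ih (done ++ [c]) skills (depth - 1) cuts start
          (by simpa using hs) (by simpa using Nat.le_succ_of_le hle) hfold
        simp only [List.length_append, List.length_cons, List.length_nil, Nat.zero_add,
          Nat.cast_add, Nat.cast_one, hc2] at this
        exact this
      · by_cases h₃ : d = [c] ∧ depth = 0
        · rw [show pvBCutStep d (cuts, depth) ((done.length : Int), c)
                = (cuts ++ [(done.length : Int)], depth) by
            simp [pvBCutStep, h₁, h₂, h₃.1, h₃.2]]
          rw [show pvAStep d (skills, (s.drop start).take (done.length - start), depth) c
                = (if PySem.Chars.strip ((s.drop start).take (done.length - start)) ≠ []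
                   then skills ++ [PySem.Chars.strip ((s.drop start).take (done.length - start))]
                   else skills, [], depth) by
            simp [pvAStep, h₁, h₂, h₃]]
          have hfold' : (cuts ++ [(done.length : Int)]).foldl (pvBEmitStep s) ([], 0)
              = (if PySem.Chars.strip ((s.drop start).take (done.length - start)) ≠ []
                 then skills ++ [PySem.Chars.strip ((s.drop start).take (done.length - start))]
                 else skills, ((done.length + 1 : Nat) : Int)) := by
            rw [List.foldl_append, hfold]
            simp only [List.foldl_cons, List.foldl_nil, pvBEmitStep,
              PySem.List.slice_natCast]
            simp
          have := ih (done ++ [c])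
            (if PySem.Chars.strip ((s.drop start).take (done.length - start)) ≠ []
             then skills ++ [PySem.Chars.strip ((s.drop start).take (done.length - start))]
             else skills) depth (cuts ++ [(done.length : Int)]) (done.length + 1)
            (by simpa using hs) (by simp) hfold'
          simpa [hs] using this
        · rw [show pvBCutStep d (cuts, depth) ((done.length : Int), c) = (cuts, depth) by
            simp [pvBCutStep, h₁, h₂]; intro hdep hd; exact absurd ⟨hd, hdep⟩ h₃]
          rw [show pvAStep d (skills, (s.drop start).take (done.length - start), depth) c
                = (skills, (s.drop start).take (done.length - start) ++ [c], depth) by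
            simp [pvAStep, h₁, h₂, h₃]]
          have hc2 : ((s.drop start).take (done.length + 1 - start))
              = (s.drop start).take (done.length - start) ++ [c] := by
            rw [hs, pv_take_drop₂ _ _ _ _ hle, pv_take_drop₁ _ _ _ hle]
          have := ih (done ++ [c]) skills depth cuts start
            (by simpa using hs) (by simpa using Nat.le_succ_of_le hle) hfold
          simp only [List.length_append, List.length_cons, List.length_nil, Nat.zero_add,
            Nat.cast_add, Nat.cast_one, hc2] at this
          exact this

-- ===== VERDICT (by name: the statement is the Claim_ definition above) =====
theorem split_skills_preserve_groups_py_spec : Claim_equal_split_skills_preserve_groups_py := by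
  intro text delimiter _
  unfold Spec_split_skills_preserve_groups_py
  unfold split_skills_preserve_groups_py split_skills_preserve_groups_py_alt
  have h := pv_inv delimiter.toList text.toList text.toList [] [] 0 [] 0
    (by simp) (by simp) (by simp)
  simp only [List.length_nil, Nat.cast_zero, Nat.sub_self, List.take_zero,
    List.drop_zero] at h
  dsimp only
  exact congrArg (List.map (fun cs => String.ofList cs)) h.symm
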